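-- pv_equiv track=rewrite | github.com/berkeleynerd/safe | scripts/audit_gnatprove_trust.py | statement_end
-- ===== SOURCE A (Python) =====
-- def statement_end(text: str, start: int) -> int | None:
--     """Return the offset after a statement semicolon, ignoring string content."""
--
--     in_string = False
--     index = start
--     while index < len(text):
--         char = text[index]
--         nxt = text[index + 1] if index + 1 < len(text) else ""
--         if char == '"':
--             if in_string and nxt == '"':
--                 index += 2
--                 continue
--             in_string = not in_string
--         elif char == ";" and not in_string:
--             return index + 1
--         index += 1
--     return None
-- ===== SOURCE B (Python) =====
-- def statement_end(text: str, start: int) -> int | None: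
--     """Return the offset after a statement semicolon, ignoring string content.
--
--     Segment-based scan using str.find instead of per-character stepping.
--     """
--     n = len(text)
--     i = start
--     while True:
--         s = text.find(";", i)
--         q = text.find('"', i)
--         if s != -1 and (q == -1 or s < q):
--             return s + 1
--         if q == -1:
--             return None
--         # inside a string literal: find its closing quote ("" is an escaped quote)
--         i = q + 1
--         while True:
--             j = text.find('"', i)
--             if j == -1:
--                 return None
--             if j + 1 < n and text[j + 1] == '"':
--                 i = j + 2
--             else:
--                 i = j + 1
--                 break
-- ===== Notes on version B (the rewrite author's own statement) =====
-- stated objective: faster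
-- what changed: A's per-character state-machine scan (in_string flag updated at every character) is replaced by a segment scan: repeated str.find for the next ';' and '"' outside strings and an inner str.find loop that jumps to a string's closing quote (treating doubled quotes), so B inspects only quote/semicolon positions instead of every character.
-- outside the precondition, e.g. on statement_end(';x', -1): A returns 1, B returns None; on statement_end('a;', -3): A raises IndexError, B returns 2
import Mathlib
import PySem

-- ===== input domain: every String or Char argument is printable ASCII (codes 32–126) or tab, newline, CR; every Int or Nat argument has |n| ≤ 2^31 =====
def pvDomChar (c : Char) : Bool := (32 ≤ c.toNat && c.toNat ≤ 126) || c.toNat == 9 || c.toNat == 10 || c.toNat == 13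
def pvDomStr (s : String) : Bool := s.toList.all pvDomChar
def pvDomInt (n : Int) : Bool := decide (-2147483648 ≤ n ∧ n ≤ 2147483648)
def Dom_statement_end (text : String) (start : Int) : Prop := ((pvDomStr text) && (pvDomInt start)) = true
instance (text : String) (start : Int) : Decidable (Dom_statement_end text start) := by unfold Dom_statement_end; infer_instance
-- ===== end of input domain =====

-- B replaces A's per-character state machine by a segment scan built on str.find (measured faster in a timing run, same O(n)).

-- ===== PORT A =====
def pvScanA (cs : List Char) (inStr : Bool) (i : Int) : Option Int :=
  if _h : i < (cs.length : Int) then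
    match PySem.List.pyGet? cs i with
    | none => none  -- Python raises IndexError here (i < -len); such inputs are outside Pre_
    | some c =>
      let nxt : Option Char := if i + 1 < (cs.length : Int) then PySem.List.pyGet? cs (i + 1) else none
      if c = '"' then
        if inStr = true ∧ nxt = some '"' then pvScanA cs inStr (i + 2)
        else pvScanA cs (!inStr) (i + 1)
      else if c = ';' ∧ inStr = false then some (i + 1)
      else pvScanA cs inStr (i + 1)
  else none
termination_by ((cs.length : Int) - i).toNat
decreasing_by all_goals omega

def statement_end (text : String) (start : Int) : Option Int :=
  pvScanA text.toList false start

-- ===== PORT B =====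
-- inner loop of Source B: from index i (just inside a string literal), return the index
-- just after its closing quote, treating "" as an escaped quote; none = unterminated
def pvSkip (cs : List Char) : Nat → Int → Option Int
  | 0, _ => none          -- fuel guard only; fuel cs.length + 1 is never exhausted
  | fuel + 1, i =>
    let j := PySem.Chars.findFrom cs ['"'] i none
    if j = -1 then none
    else if j + 1 < (cs.length : Int) ∧ PySem.List.pyGet? cs (j + 1) = some '"' then
      pvSkip cs fuel (j + 2)
    else some (j + 1)

-- outer loop of Source B
def pvOuter (cs : List Char) : Nat → Int → Option Int
  | 0, _ => none          -- fuel guard only; fuel cs.length + 2 is never exhausted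
  | fuel + 1, i =>
    let s := PySem.Chars.findFrom cs [';'] i none
    let q := PySem.Chars.findFrom cs ['"'] i none
    if s ≠ -1 ∧ (q = -1 ∨ s < q) then some (s + 1)
    else if q = -1 then none
    else
      match pvSkip cs (cs.length + 1) (q + 1) with
      | none => none
      | some i' => pvOuter cs fuel i'

def statement_end_alt (text : String) (start : Int) : Option Int :=
  pvOuter text.toList (text.toList.length + 2) start

-- ===== PRECONDITION & SPEC =====
-- Pre_ excludes negative start, outside this offset function's natural domain: there A either
-- raises IndexError (start < -len(text)) or scans by Python's negative-index wraparound (reading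
-- the tail and then rescanning from offset 0), while B's find-based scan clamps instead.
def Pre_statement_end (text : String) (start : Int) : Prop := 0 ≤ start
instance (text : String) (start : Int) : Decidable (Pre_statement_end text start) := by
  unfold Pre_statement_end; infer_instance
def pvWitness_statement_end : String × Int := ("x := \"a;b\"; y", 0)

def Spec_statement_end (text : String) (start : Int) (out : Option Int) : Prop :=
  out = statement_end_alt text start
instance (text : String) (start : Int) (out : Option Int) : Decidable (Spec_statement_end text start out) := by
  unfold Spec_statement_end; infer_instance

-- ===== CLAIM (what is proved, stated in full; the proofs are below) =====
def Claim_equal_statement_end : Prop := ∀ (text : String) (start : Int),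
  Dom_statement_end text start → Pre_statement_end text start →
  Spec_statement_end text start (statement_end text start)

-- ===== LEMMAS AND PROOFS =====

theorem pref_single (l : List Char) (c : Char) : ([c] <+: l) ↔ l.head? = some c := by
  cases l with
  | nil => simp
  | cons x xs => simp [List.cons_prefix_cons, eq_comm]

theorem pref_drop (l : List Char) (c : Char) (j : Nat) : ([c] <+: l.drop j) ↔ l[j]? = some c := by
  rw [pref_single, List.head?_drop]

theorem getElem?_ne_of_ge (l : List Char) (c : Char) (j : Nat) (h : l.length ≤ j) : l[j]? ≠ some c := by
  rw [List.getElem?_eq_none_iff.mpr (by omega)]; simp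

theorem mem_drop_iff (l : List Char) (c : Char) (k : Nat) :
    c ∈ l.drop k ↔ ∃ j, k ≤ j ∧ l[j]? = some c := by
  constructor
  · intro h
    obtain ⟨i, hi, he⟩ := List.mem_iff_getElem.mp h
    refine ⟨k + i, by omega, ?_⟩
    rw [← List.getElem?_drop, List.getElem?_eq_getElem hi, he]
  · intro ⟨j, hk, he⟩
    have hj : j < l.length := by
      by_contra h
      exact getElem?_ne_of_ge l c j (by omega) he
    refine List.mem_of_getElem? (i := j - k) ?_
    rw [List.getElem?_drop, show k + (j - k) = j by omega]; exact he

-- first-occurrence characterisation of Python's text.find(c, k) for a single character and k ≥ 0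
theorem findChar (cs : List Char) (c : Char) (k : Nat) :
    (PySem.Chars.findFrom cs [c] (k:Int) none = -1 ∧ ∀ j, k ≤ j → cs[j]? ≠ some c) ∨
    (∃ rn : Nat, PySem.Chars.findFrom cs [c] (k:Int) none = (rn:Int) ∧ k ≤ rn ∧ rn < cs.length ∧ cs[rn]? = some c ∧
       ∀ j, k ≤ j → j < rn → cs[j]? ≠ some c) := by
  by_cases hk : k ≤ cs.length
  · by_cases h : PySem.Chars.findFrom cs [c] (k:Int) none = -1
    · left
      refine ⟨h, ?_⟩
      rw [PySem.Chars.findFrom_natCast_eq_neg_one_iff cs [c] k hk] at h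
      intro j hj he
      exact h ((List.singleton_infix_iff c _).mpr ((mem_drop_iff cs c k).mpr ⟨j, hj, he⟩))
    · right
      obtain ⟨h1, h2, h3⟩ := PySem.Chars.findFrom_natCast_spec cs [c] k hk h
      have hnn : 0 ≤ PySem.Chars.findFrom cs [c] (k:Int) none := le_trans (by omega) h1
      have hch := (pref_drop cs c _).mp h2
      have hlt : (PySem.Chars.findFrom cs [c] (k:Int) none).toNat < cs.length := by
        by_contra hc
        exact getElem?_ne_of_ge cs c _ (by omega) hch
      refine ⟨(PySem.Chars.findFrom cs [c] (k:Int) none).toNat, by omega, by omega, hlt, hch, ?_⟩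
      intro j hj hjlt he
      exact h3 j hj hjlt ((pref_drop cs c j).mpr he)
  · left
    constructor
    · simp only [PySem.Chars.findFrom]
      have h1 : ¬ ((k:Int) < 0) := by omega
      have h2 : (cs.length : Int) < (k:Int) := by omega
      rw [if_neg h1, if_pos h2]
    · intro j hj he
      exact getElem?_ne_of_ge cs c j (by omega) he

theorem pvF_none (cs : List Char) (c : Char) (k : Nat) (hk : cs.length ≤ k) :
    PySem.Chars.findFrom cs [c] (k:Int) none = -1 := by
  rcases findChar cs c k with ⟨h, _⟩ | ⟨rn, _, h1, h2, _, _⟩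
  · exact h
  · omega

theorem pvF_self (cs : List Char) (c : Char) (k : Nat) (hk : k < cs.length) (hc : cs[k]? = some c) :
    PySem.Chars.findFrom cs [c] (k:Int) none = (k:Int) := by
  rcases findChar cs c k with ⟨_, h⟩ | ⟨rn, he, h1, _, _, hmin⟩
  · exact absurd hc (h k le_rfl)
  · rcases Nat.lt_or_ge k rn with hlt | _
    · exact absurd hc (hmin k le_rfl hlt)
    · rw [he]; omega

theorem pvF_step (cs : List Char) (c : Char) (k : Nat) (hk : k < cs.length) (hc : cs[k]? ≠ some c) :
    PySem.Chars.findFrom cs [c] (k:Int) none = PySem.Chars.findFrom cs [c] ((k+1 : Nat):Int) none := by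
  rcases findChar cs c k with ⟨h1, h2⟩ | ⟨rn, he, hge, hlt, hat, hmin⟩
  · rcases findChar cs c (k+1) with ⟨h1', _⟩ | ⟨rn', he', hge', _, hat', _⟩
    · rw [h1, h1']
    · exact absurd hat' (h2 rn' (by omega))
  · rcases findChar cs c (k+1) with ⟨_, h2'⟩ | ⟨rn', he', hge', _, hat', hmin'⟩
    · have hrk : rn ≠ k := fun h => hc (h ▸ hat)
      exact absurd hat (h2' rn (by omega))
    · rw [he, he']
      have hrk : rn ≠ k := fun h => hc (h ▸ hat)
      have h1 : ¬ rn < rn' := fun hlt' => hmin' rn (by omega) hlt' hat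
      have h2 : ¬ rn' < rn := fun hlt' => hmin rn' (by omega) hlt' hat'
      omega

theorem pvF_ge (cs : List Char) (c : Char) (k : Nat)
    (h : PySem.Chars.findFrom cs [c] (k:Int) none ≠ -1) :
    (k:Int) ≤ PySem.Chars.findFrom cs [c] (k:Int) none ∧
    PySem.Chars.findFrom cs [c] (k:Int) none < (cs.length : Int) := by
  rcases findChar cs c k with ⟨h1, _⟩ | ⟨rn, he, hge, hlt, _, _⟩
  · exact absurd h1 h
  · rw [he]; omega

-- pvSkip only moves forward and never past cs.length
theorem pvSkip_some (cs : List Char) : ∀ (fuel : Nat) (k : Nat) (r : Int),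
    pvSkip cs fuel (k:Int) = some r → (k:Int) < r ∧ r ≤ (cs.length : Int) := by
  intro fuel
  induction fuel with
  | zero => intro k r h; simp [pvSkip] at h
  | succ f ih =>
    intro k r h
    rw [pvSkip] at h
    by_cases hj : PySem.Chars.findFrom cs ['"'] (k:Int) none = -1
    · simp [hj] at h
    · obtain ⟨hge, hlt⟩ := pvF_ge cs '"' k hj
      simp only [hj, if_false] at h
      split at h
      · have hcast : PySem.Chars.findFrom cs ['"'] (k:Int) none + 2
            = (((PySem.Chars.findFrom cs ['"'] (k:Int) none).toNat + 2 : Nat) : Int) := by omega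
        rw [hcast] at h
        have := ih _ _ h
        omega
      · rename_i hnd
        rw [Option.some_inj] at h
        omega

theorem pvScanA_term (cs : List Char) (b : Bool) (k : Nat) (hk : cs.length ≤ k) :
    pvScanA cs b (k:Int) = none := by
  rw [pvScanA, dif_neg (show ¬ ((k:Int) < (cs.length:Int)) by omega)]

theorem pvSkip_term (cs : List Char) (fuel k : Nat) (hk : cs.length ≤ k) :
    pvSkip cs fuel (k:Int) = none := by
  cases fuel with
  | zero => rfl
  | succ f => rw [pvSkip]; simp [pvF_none cs '"' k hk]

theorem pvScanA_step (cs : List Char) (b : Bool) (k : Nat) (hk : k < cs.length) :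
    pvScanA cs b (k:Int) =
      (if cs[k] = '"' then
        (if b = true ∧ (if k+1 < cs.length then cs[k+1]? else none) = some '"'
         then pvScanA cs b (((k+2 : Nat)):Int)
         else pvScanA cs (!b) (((k+1 : Nat)):Int))
       else if cs[k] = ';' ∧ b = false then some ((k:Int) + 1)
       else pvScanA cs b (((k+1 : Nat)):Int)) := by
  have e1 : (k:Int) + 1 = ((k+1 : Nat):Int) := by omega
  have e2 : (k:Int) + 2 = ((k+2 : Nat):Int) := by omega
  rw [pvScanA, dif_pos (show (k:Int) < (cs.length:Int) by omega), e1, e2]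
  simp only [PySem.List.pyGet?_natCast, List.getElem?_eq_getElem hk]
  simp only [Nat.cast_lt]

-- A's in-string scan agrees with B's pvSkip followed by A's out-of-string scan
theorem pvSkip_eq (cs : List Char) : ∀ (m fuel k : Nat),
    cs.length + 1 - k ≤ m → cs.length + 1 ≤ fuel + k →
    pvScanA cs true (k:Int) = (pvSkip cs fuel (k:Int)).elim none (fun i' => pvScanA cs false i') := by
  intro m
  induction m with
  | zero =>
    intro fuel k hm hf
    have hk : cs.length ≤ k := by omega
    rw [pvScanA_term cs true k hk, pvSkip_term cs fuel k hk]
    rfl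
  | succ m ih =>
    intro fuel k hm hf
    by_cases hk : cs.length ≤ k
    · rw [pvScanA_term cs true k hk, pvSkip_term cs fuel k hk]; rfl
    · rw [not_le] at hk
      obtain ⟨f, rfl⟩ : ∃ f, fuel = f + 1 := ⟨fuel - 1, by omega⟩
      have hget : cs[k]? = some cs[k] := List.getElem?_eq_getElem hk
      rw [pvScanA_step cs true k hk]
      by_cases hq : cs[k] = '"'
      · -- at a quote inside the string
        rw [if_pos hq]
        have hj : PySem.Chars.findFrom cs ['"'] (k:Int) none = (k:Int) :=
          pvF_self cs '"' k hk (by rw [hget, hq])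
        rw [pvSkip, hj]
        rw [if_neg (show ¬ ((k:Int) = -1) by omega)]
        have e1 : (k:Int) + 1 = ((k+1 : Nat):Int) := by omega
        have e2 : (k:Int) + 2 = ((k+2 : Nat):Int) := by omega
        by_cases hd : (k:Int) + 1 < (cs.length:Int) ∧ PySem.List.pyGet? cs ((k:Int) + 1) = some '"'
        · -- doubled quote: both skip two characters
          rw [if_pos hd]
          obtain ⟨hd1, hd2⟩ := hd
          rw [e1] at hd2
          rw [PySem.List.pyGet?_natCast] at hd2
          rw [if_pos (show true = true ∧ (if k+1 < cs.length then cs[k+1]? else none) = some '"' by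
            refine ⟨rfl, ?_⟩; rw [if_pos (by omega)]; exact hd2)]
          rw [e2]
          exact ih f (k+2) (by omega) (by omega)
        · -- closing quote: A toggles out, B returns k+1
          rw [if_neg hd]
          rw [if_neg (show ¬ (true = true ∧ (if k+1 < cs.length then cs[k+1]? else none) = some '"') by
            rintro ⟨-, hc⟩
            apply hd
            by_cases hlt : k + 1 < cs.length
            · rw [if_pos hlt] at hc
              exact ⟨by omega, by rw [e1, PySem.List.pyGet?_natCast]; exact hc⟩
            · rw [if_neg hlt] at hc; exact absurd hc (by simp))]
          rw [e1]
          rfl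
      · -- any other character is skipped by A; B's find steps over it
        rw [if_neg hq, if_neg (by rintro ⟨-, hb⟩; exact Bool.noConfusion hb)]
        have hstep : pvSkip cs (f+1) (k:Int) = pvSkip cs (f+1) ((k+1 : Nat):Int) := by
          rw [pvSkip, pvSkip, pvF_step cs '"' k hk (by rw [hget]; simp [hq])]
        rw [hstep]
        exact ih (f+1) (k+1) (by omega) (by omega)

theorem pvOuter_term (cs : List Char) (fuel k : Nat) (hk : cs.length ≤ k) :
    pvOuter cs fuel (k:Int) = none := by
  cases fuel with
  | zero => rfl
  | succ f =>
    rw [pvOuter]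
    simp [pvF_none cs ';' k hk, pvF_none cs '"' k hk]

-- A's out-of-string scan agrees with B's outer loop
theorem pvOut_eq (cs : List Char) : ∀ (m fuel k : Nat),
    cs.length + 2 - k ≤ m → cs.length + 2 ≤ fuel + k →
    pvScanA cs false (k:Int) = pvOuter cs fuel (k:Int) := by
  intro m
  induction m with
  | zero =>
    intro fuel k hm hf
    have hk : cs.length ≤ k := by omega
    rw [pvScanA_term cs false k hk, pvOuter_term cs fuel k hk]
  | succ m ih =>
    intro fuel k hm hf
    by_cases hk : cs.length ≤ k
    · rw [pvScanA_term cs false k hk, pvOuter_term cs fuel k hk]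
    · rw [not_le] at hk
      obtain ⟨f, rfl⟩ : ∃ f, fuel = f + 1 := ⟨fuel - 1, by omega⟩
      have hget : cs[k]? = some cs[k] := List.getElem?_eq_getElem hk
      have e1 : (k:Int) + 1 = ((k+1 : Nat):Int) := by omega
      rw [pvScanA_step cs false k hk]
      by_cases hq : cs[k] = '"'
      · -- opening quote: A flips in_string; B jumps into pvSkip
        rw [if_pos hq, if_neg (by rintro ⟨hb, -⟩; exact Bool.noConfusion hb)]
        have hskip := pvSkip_eq cs (cs.length + 1) (cs.length + 1) (k+1) (by omega) (by omega)
        rw [show (!false) = true from rfl, hskip]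
        have hjq : PySem.Chars.findFrom cs ['"'] (k:Int) none = (k:Int) :=
          pvF_self cs '"' k hk (by rw [hget, hq])
        rw [pvOuter, hjq]
        have hcond : ¬ (PySem.Chars.findFrom cs [';'] (k:Int) none ≠ -1 ∧
            ((k:Int) = -1 ∨ PySem.Chars.findFrom cs [';'] (k:Int) none < (k:Int))) := by
          rintro ⟨hs, hor⟩
          rcases hor with h | h
          · omega
          · have hstep : PySem.Chars.findFrom cs [';'] (k:Int) none
                = PySem.Chars.findFrom cs [';'] ((k+1 : Nat):Int) none :=
              pvF_step cs ';' k hk (by rw [hget]; simp [hq])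
            rw [hstep] at hs h
            have := (pvF_ge cs ';' (k+1) hs).1
            omega
        rw [if_neg hcond, if_neg (show ¬ ((k:Int) = -1) by omega), e1]
        cases hsk : pvSkip cs (cs.length + 1) (((k+1 : Nat)):Int) with
        | none => rfl
        | some i' =>
          obtain ⟨hgt, hle⟩ := pvSkip_some cs (cs.length + 1) (k+1) i' hsk
          have ei : i' = ((i'.toNat : Nat) : Int) := by omega
          simp only [Option.elim]
          rw [ei]
          exact ih f i'.toNat (by omega) (by omega)
      · by_cases hs : cs[k] = ';'
        · -- semicolon outside a string: both return k+1
          rw [if_neg hq, if_pos ⟨hs, rfl⟩]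
          have hjs : PySem.Chars.findFrom cs [';'] (k:Int) none = (k:Int) :=
            pvF_self cs ';' k hk (by rw [hget, hs])
          rw [pvOuter, hjs]
          have hcond : PySem.Chars.findFrom cs ['"'] (k:Int) none = -1 ∨
              (k:Int) < PySem.Chars.findFrom cs ['"'] (k:Int) none := by
            by_cases hq1 : PySem.Chars.findFrom cs ['"'] (k:Int) none = -1
            · exact Or.inl hq1
            · right
              have hstep : PySem.Chars.findFrom cs ['"'] (k:Int) none
                  = PySem.Chars.findFrom cs ['"'] ((k+1 : Nat):Int) none :=
                pvF_step cs '"' k hk (by rw [hget]; simp [hq])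
              rw [hstep] at hq1 ⊢
              have := (pvF_ge cs '"' (k+1) hq1).1
              omega
          rw [if_pos ⟨show ¬ ((k:Int) = -1) by omega, hcond⟩]
        · -- ordinary character: A steps; both finds step over it
          rw [if_neg hq, if_neg (by rintro ⟨hc, -⟩; exact hs hc)]
          have hstep : pvOuter cs (f+1) (k:Int) = pvOuter cs (f+1) ((k+1 : Nat):Int) := by
            rw [pvOuter, pvOuter,
              pvF_step cs ';' k hk (by rw [hget]; simp [hs]),
              pvF_step cs '"' k hk (by rw [hget]; simp [hq])]
          rw [hstep]
          exact ih (f+1) (k+1) (by omega) (by omega)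

-- ===== VERDICT (by name: the statement is the Claim_ definition above) =====
theorem statement_end_spec : Claim_equal_statement_end := by
  intro text start _ hpre
  unfold Spec_statement_end statement_end statement_end_alt
  have hs : start = ((start.toNat : Nat) : Int) := by
    unfold Pre_statement_end at hpre; omega
  rw [hs]
  exact pvOut_eq text.toList (text.toList.length + 2) (text.toList.length + 2) start.toNat
    (by omega) (by omega)
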